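-- pv_equiv track=rewrite | github.com/malcops/projects | advent-of-code/2020/day14.py | update_memory
-- ===== SOURCE A (Python) =====
-- import itertools
--
-- def update_memory(memory_str, memory, value):
--
--     # indices
--     addr_to_update = []
--     memory_format = ''
--     for idx, x in enumerate(memory_str):
--         if x == "X":
--             addr_to_update.append(idx)
--             memory_format += "{}"
--         else:
--             memory_format += x
--
--     # combos of indices e.g. [(0,0), (0,1), (1,0), (1,1)]
--     combinations = list(itertools.product(range(2), repeat=len(addr_to_update)))
--     addresses = []
--     for combo in combinations:
--         address = memory_format.format(*combo) # use tuple as format string!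
--         addresses.append(address)
--
--     # update memory dict
--     for addr in addresses:
--         memory[addr] = int(value)
--
--     return memory
-- ===== SOURCE B (Python) =====
-- def update_memory(memory_str, memory, value):
--     # Build addresses by incremental string growth over memory_str's characters.
--     addrs = ['']
--     for ch in memory_str:
--         if ch == 'X':
--             addrs = [a + b for a in addrs for b in '01']
--         else:
--             addrs = [a + ch for a in addrs]
--     for addr in addrs:
--         memory[addr] = int(value)
--     return memory
-- ===== Notes on version B (the rewrite author's own statement) =====
-- stated objective: simpler
-- what changed: Replaces A's wildcard-index list, '{}' format template and itertools.product enumeration by a single left-to-right sweep that grows a working list of partial address strings (branching on each 'X'), then writes int(value) at each finished address.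
-- outside the precondition, e.g. on update_memory('{X}', {}, '5'): A returns {'{}': 5}, B returns {'{0}': 5, '{1}': 5}; on update_memory('{', {}, '5'): A raises ValueError, B returns {'{': 5}
import Mathlib
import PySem

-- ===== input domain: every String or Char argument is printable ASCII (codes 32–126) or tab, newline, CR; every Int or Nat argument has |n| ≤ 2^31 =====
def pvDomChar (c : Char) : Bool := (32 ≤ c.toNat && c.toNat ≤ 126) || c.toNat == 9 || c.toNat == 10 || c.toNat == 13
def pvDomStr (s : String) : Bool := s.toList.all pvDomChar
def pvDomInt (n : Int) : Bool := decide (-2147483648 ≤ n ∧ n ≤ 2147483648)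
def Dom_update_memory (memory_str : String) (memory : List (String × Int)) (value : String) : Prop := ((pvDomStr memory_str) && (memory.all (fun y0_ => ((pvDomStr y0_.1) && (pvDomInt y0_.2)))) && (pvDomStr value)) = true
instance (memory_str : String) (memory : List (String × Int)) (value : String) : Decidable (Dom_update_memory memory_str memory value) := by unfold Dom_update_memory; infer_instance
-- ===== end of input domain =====

-- B builds the wildcard addresses by incremental string growth instead of A's index list +
-- format template + itertools.product (objective: simpler). A mutates the memory dict in
-- place; the equivalence proved here is about the RETURN value (B performs the same mutation).

-- ===== PORT A =====
-- step-for-step port of str.format on A's generated templates: "{}" consumes the next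
-- argument (rendered with str()); any other char is copied. Exact on Pre_ inputs, where
-- memory_str contains no braces, so the template's only braces are the generated "{}" pairs.
def pyFormat : List Char → List Int → List Char
  | [], _ => []
  | c :: '}' :: rest', a :: args' =>
    if c = '{' then PySem.Int.toChars a ++ pyFormat rest' args'
    else c :: pyFormat ('}' :: rest') (a :: args')
  | c :: rest, args => c :: pyFormat rest args

-- itertools.product(range(2), repeat=n): lexicographic, first coordinate slowest
def pyProduct01 : Nat → List (List Int)
  | 0 => [[]]
  | n + 1 => (pyProduct01 n).map (fun t => 0 :: t) ++ (pyProduct01 n).map (fun t => 1 :: t)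

def update_memory (memory_str : String) (memory : List (String × Int)) (value : String) : List (String × Int) :=
  let st := (PySem.List.enumerate memory_str.toList).foldl
      (fun (st : List Int × List Char) p =>
        if p.2 = 'X' then (st.1 ++ [p.1], st.2 ++ ['{', '}'])
        else (st.1, st.2 ++ [p.2])) ([], [])
  let combinations := pyProduct01 st.1.length
  let addresses := combinations.foldl (fun acc combo => acc ++ [pyFormat st.2 combo]) ([] : List (List Char))
  (addresses.foldl
      (fun d addr => d.insert (String.mk addr) ((PySem.Int.ofStr? value).getD 0))
      (PySem.Dict.ofList memory)).items

-- ===== PORT B =====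
def update_memory_alt (memory_str : String) (memory : List (String × Int)) (value : String) : List (String × Int) :=
  let addrs := memory_str.toList.foldl
      (fun (addrs : List (List Char)) ch =>
        if ch = 'X' then addrs.flatMap (fun a => ['0', '1'].map (fun b => a ++ [b]))
        else addrs.map (fun a => a ++ [ch])) [([] : List Char)]
  (addrs.foldl
      (fun d a => d.insert (String.mk a) ((PySem.Int.ofStr? value).getD 0))
      (PySem.Dict.ofList memory)).items

-- ===== PRECONDITION & SPEC =====
-- Pre_ excludes memory_str containing '{' or '}' (there str.format usually raises
-- ValueError/IndexError, and where it returns — brace-escape patterns like "{X}" — A's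
-- output is an artefact of brace escaping) and values int() rejects (ValueError).
def Pre_update_memory (memory_str : String) (memory : List (String × Int)) (value : String) : Prop :=
  (PySem.Int.ofStr? value).isSome = true ∧ '{' ∉ memory_str.toList ∧ '}' ∉ memory_str.toList
instance (memory_str : String) (memory : List (String × Int)) (value : String) : Decidable (Pre_update_memory memory_str memory value) := by unfold Pre_update_memory; infer_instance

def pvWitness_update_memory : String × (List (String × Int)) × String := ("X0X", [("00", 1)], " 7 ")

def Spec_update_memory (memory_str : String) (memory : List (String × Int)) (value : String) (out : List (String × Int)) : Prop := out = update_memory_alt memory_str memory value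
instance (memory_str : String) (memory : List (String × Int)) (value : String) (out : List (String × Int)) : Decidable (Spec_update_memory memory_str memory value out) := by unfold Spec_update_memory; infer_instance

-- ===== CLAIM (what is proved, stated in full; the proofs are below) =====
def Claim_equal_update_memory : Prop := ∀ (memory_str : String) (memory : List (String × Int)) (value : String), Dom_update_memory memory_str memory value → Pre_update_memory memory_str memory value → Spec_update_memory memory_str memory value (update_memory memory_str memory value)

-- ===== LEMMAS AND PROOFS =====

-- proof-only recursive characterisations of the two address pipelines
def pvFmt : List Char → List Char
  | [] => []
  | c :: s => if c = 'X' then '{' :: '}' :: pvFmt s else c :: pvFmt s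

def pvFill : List Char → List (List Char)
  | [] => [[]]
  | c :: s =>
    if c = 'X' then (pvFill s).map (fun t => '0' :: t) ++ (pvFill s).map (fun t => '1' :: t)
    else (pvFill s).map (fun t => c :: t)

theorem pyFormat_nil (args : List Int) : pyFormat [] args = [] := by
  simp [pyFormat]

theorem pyFormat_brace (f : List Char) (a : Int) (args : List Int) :
    pyFormat ('{' :: '}' :: f) (a :: args) = PySem.Int.toChars a ++ pyFormat f args := by
  simp [pyFormat]

theorem pyFormat_copy (c : Char) (hc : c ≠ '{') (f : List Char) (args : List Int) :
    pyFormat (c :: f) args = c :: pyFormat f args := by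
  rcases f with _ | ⟨d, f'⟩ <;> rcases args with _ | ⟨a, as⟩ <;>
    try simp_all [pyFormat]
  by_cases hd : d = '}'
  · subst hd; simp [pyFormat, hc]
  · simp [pyFormat, hd]

-- A's first loop: second component is the format template
theorem pvA_loop_snd (s : List Char) : ∀ (k : Int) (l : List Int) (f : List Char),
    ((PySem.List.enumerate s k).foldl
      (fun (st : List Int × List Char) p =>
        if p.2 = 'X' then (st.1 ++ [p.1], st.2 ++ ['{', '}'])
        else (st.1, st.2 ++ [p.2])) (l, f)).2 = f ++ pvFmt s := by
  induction s with
  | nil => intro k l f; simp [PySem.List.enumerate_nil, pvFmt]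
  | cons c s ih =>
    intro k l f
    rw [PySem.List.enumerate_cons]
    by_cases hc : c = 'X' <;> simp [List.foldl_cons, hc, pvFmt, ih]

-- A's first loop: length of the index list counts the X's
theorem pvA_loop_fst_len (s : List Char) : ∀ (k : Int) (l : List Int) (f : List Char),
    ((PySem.List.enumerate s k).foldl
      (fun (st : List Int × List Char) p =>
        if p.2 = 'X' then (st.1 ++ [p.1], st.2 ++ ['{', '}'])
        else (st.1, st.2 ++ [p.2])) (l, f)).1.length = l.length + s.count 'X' := by
  induction s with
  | nil => intro k l f; simp [PySem.List.enumerate_nil]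
  | cons c s ih =>
    intro k l f
    rw [PySem.List.enumerate_cons]
    by_cases hc : c = 'X' <;>
      simp [List.foldl_cons, hc, ih, List.count_cons] <;> omega

-- A's second loop appends one formatted address per combo
theorem pvFoldl_append_map (g : List Int → List Char) (l : List (List Int)) :
    ∀ acc : List (List Char),
    l.foldl (fun acc combo => acc ++ [g combo]) acc = acc ++ l.map g := by
  induction l with
  | nil => intro acc; simp
  | cons x l ih => intro acc; simp [List.foldl_cons, ih]

-- formatting all combos of the template of a brace-free string = pvFill
theorem pvFormat_product (s : List Char) (h1 : '{' ∉ s) (h2 : '}' ∉ s) :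
    (pyProduct01 (s.count 'X')).map (pyFormat (pvFmt s)) = pvFill s := by
  induction s with
  | nil => simp [pvFmt, pvFill, pyProduct01, pyFormat_nil]
  | cons c s ih =>
    have h1s : '{' ∉ s := fun h => h1 (List.mem_cons_of_mem _ h)
    have h2s : '}' ∉ s := fun h => h2 (List.mem_cons_of_mem _ h)
    have ih' := ih h1s h2s
    by_cases hc : c = 'X'
    · subst hc
      simp only [pvFmt, pvFill, List.count_cons_self, reduceIte]
      simp only [pyProduct01, List.map_append, List.map_map]
      congr 1
      · rw [← ih', List.map_map]
        apply List.map_congr_left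
        intro t _
        rw [Function.comp_apply, pyFormat_brace]
        rfl
      · rw [← ih', List.map_map]
        apply List.map_congr_left
        intro t _
        rw [Function.comp_apply, pyFormat_brace]
        rfl
    · have hcb : c ≠ '{' := fun h => h1 (h ▸ List.mem_cons_self ..)
      simp only [pvFmt, pvFill]
      rw [if_neg hc, if_neg hc]
      have hcount : (c :: s).count 'X' = s.count 'X' := by simp [List.count_cons, hc]
      rw [hcount]
      rw [← ih', List.map_map]
      apply List.map_congr_left
      intro t _
      rw [Function.comp_apply, pyFormat_copy c hcb]

-- B's fold, generalized over the accumulator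
theorem pvB_fold (s : List Char) : ∀ acc : List (List Char),
    s.foldl (fun (addrs : List (List Char)) ch =>
        if ch = 'X' then addrs.flatMap (fun a => ['0', '1'].map (fun b => a ++ [b]))
        else addrs.map (fun a => a ++ [ch])) acc
    = acc.flatMap (fun a => (pvFill s).map (fun t => a ++ t)) := by
  induction s with
  | nil => intro acc; simp [pvFill]
  | cons c s ih =>
    intro acc
    by_cases hc : c = 'X'
    · subst hc
      simp only [List.foldl_cons, reduceIte, ih, pvFill]
      rw [List.flatMap_assoc]
      congr 1
      funext a
      simp [List.append_assoc, Function.comp_def]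
    · simp only [List.foldl_cons, if_neg hc, ih, pvFill, if_neg hc]
      rw [List.flatMap_map]
      congr 1
      funext a
      simp [List.map_map, Function.comp_def, List.append_assoc]

-- ===== VERDICT (by name: the statement is the Claim_ definition above) =====
theorem update_memory_spec : Claim_equal_update_memory := by
  intro memory_str memory value _hdom hpre
  obtain ⟨_hv, h1, h2⟩ := hpre
  unfold Spec_update_memory
  simp only [update_memory, update_memory_alt]
  rw [pvA_loop_snd, pvA_loop_fst_len, pvFoldl_append_map, pvB_fold]
  simp only [List.length_nil, Nat.zero_add, List.nil_append]
  rw [pvFormat_product memory_str.toList h1 h2]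
  simp
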